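-- pv_equiv track=rewrite | github.com/Yeom-Yeom/CodingTest_Practice | Lv.1/page1/fruit_seller.py | fruit_seller
-- ===== SOURCE A (Python) =====
-- def fruit_seller(k,m,score):
--     answer = 0
--     if m > len(score):
--         answer=0
--     else:
--         sort_score = sorted(score,reverse=True)
--         sort_slice = [sort_score[i:i+m] for i in range(0,len(sort_score),m)
--                       if len(sort_score[i:i+m])==m]
--         for i in sort_slice:
--             answer+= min(i)*len(i)
--
--     return answer
-- ===== SOURCE B (Python) =====
-- def fruit_seller(k, m, score):
--     n = len(score)
--     if m > n:
--         return 0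
--     asc = sorted(score)
--     return m * sum(asc[i] for i in range(n - m, -1, -m))
-- ===== Notes on version B (the rewrite author's own statement) =====
-- stated objective: alternative
-- what changed: B sorts ASCENDING (not descending), walks backwards from index n-m with stride -m so each full group's minimum is read directly as the group's first ascending element, and multiplies the summed minima by m once at the end, replacing A's descending sort, chunk-slice comprehension and per-chunk min() scans.
import Mathlib
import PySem

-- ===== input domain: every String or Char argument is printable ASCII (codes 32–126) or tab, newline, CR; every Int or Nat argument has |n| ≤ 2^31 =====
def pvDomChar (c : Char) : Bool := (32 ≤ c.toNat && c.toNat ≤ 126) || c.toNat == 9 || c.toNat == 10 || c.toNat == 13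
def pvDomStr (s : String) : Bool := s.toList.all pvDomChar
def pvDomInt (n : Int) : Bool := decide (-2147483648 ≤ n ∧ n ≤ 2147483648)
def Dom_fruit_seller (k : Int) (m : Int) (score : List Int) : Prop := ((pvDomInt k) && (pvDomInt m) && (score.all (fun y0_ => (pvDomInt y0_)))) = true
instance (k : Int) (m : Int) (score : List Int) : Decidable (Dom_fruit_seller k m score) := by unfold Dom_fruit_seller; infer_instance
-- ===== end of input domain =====

-- B sorts ASCENDING and walks backwards from index n-m with stride -m, summing the group
-- minima (each group's first element in ascending order) and multiplying by m once at the
-- end — no descending sort, no chunk slices, no per-chunk min(); objective: alternative (same cost, different decomposition).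

-- ===== PORT A =====
def fruit_seller (k : Int) (m : Int) (score : List Int) : Int :=
  if m > (score.length : Int) then 0
  else
    let sort_score := PySem.List.sorted score (fun x => x) true
    let sort_slice :=
      ((PySem.List.pyRange 0 (sort_score.length : Int) m).filter
        (fun i => ((PySem.List.slice sort_score (some i) (some (i + m))).length : Int) == m)).map
        (fun i => PySem.List.slice sort_score (some i) (some (i + m)))
    sort_slice.foldl
      -- Python's min() raises on []; each kept chunk has length m ≥ 1 whenever this loop runs
      -- (Pre_ excludes m = 0), so the .getD 0 default is never used on admitted inputs.
      (fun answer c => answer + (PySem.List.min? c (fun x => x)).getD 0 * (c.length : Int)) 0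

-- ===== PORT B =====
def fruit_seller_alt (k : Int) (m : Int) (score : List Int) : Int :=
  let n : Int := (score.length : Int)
  if m > n then 0
  else
    let asc := PySem.List.sorted score (fun x => x) false
    -- asc[i] is always in range for i produced by this backwards range (Pre_ excludes m = 0),
    -- so the pyGetD default 0 is never used on admitted inputs.
    m * (PySem.List.pyRange (n - m) (-1) (-m)).foldl
        (fun acc i => acc + PySem.List.pyGetD asc i 0) 0

-- ===== PRECONDITION & SPEC =====
-- Pre_ excludes exactly m = 0, on which both Pythons raise ValueError (range() with step 0).
def Pre_fruit_seller (k : Int) (m : Int) (score : List Int) : Prop := m ≠ 0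
instance (k : Int) (m : Int) (score : List Int) : Decidable (Pre_fruit_seller k m score) := by unfold Pre_fruit_seller; infer_instance
def pvWitness_fruit_seller : Int × Int × List Int := (4, 2, [1, 2, 3, 1, 2])
def Spec_fruit_seller (k : Int) (m : Int) (score : List Int) (out : Int) : Prop := out = fruit_seller_alt k m score
instance (k : Int) (m : Int) (score : List Int) (out : Int) : Decidable (Spec_fruit_seller k m score out) := by unfold Spec_fruit_seller; infer_instance

-- ===== CLAIM (what is proved, stated in full; the proofs are below) =====
def Claim_equal_fruit_seller : Prop := ∀ (k : Int) (m : Int) (score : List Int), Dom_fruit_seller k m score → Pre_fruit_seller k m score → Spec_fruit_seller k m score (fruit_seller k m score)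

-- ===== LEMMAS AND PROOFS =====

-- a python range with negative step and start ≤ stop is empty
lemma pyRange_neg_nil (a b s : Int) (hs : s < 0) (hab : a ≤ b) :
    PySem.List.pyRange a b s = [] := by
  unfold PySem.List.pyRange
  rw [if_neg (by omega)]
  simp only
  rw [if_neg (by omega), if_neg (by omega)]
  simp

-- a python range with positive step and stop ≤ start is empty
lemma pyRange_pos_nil (a b s : Int) (hs : 0 < s) (hab : b ≤ a) :
    PySem.List.pyRange a b s = [] := by
  unfold PySem.List.pyRange
  rw [if_neg (by omega)]
  simp only
  rw [if_pos (by omega), if_neg (by omega)]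
  simp

lemma range_filter_lt (q c : Nat) (h : q ≤ c) :
    (List.range c).filter (fun j => decide (j < q)) = List.range q := by
  obtain ⟨d, rfl⟩ : ∃ d, c = q + d := ⟨c - q, by omega⟩
  rw [List.range_add, List.filter_append]
  rw [List.filter_eq_self.2 (by intro a ha; simp at ha ⊢; omega)]
  rw [List.filter_eq_nil_iff.2 (by
    intro a ha
    simp only [List.mem_map, List.mem_range] at ha
    obtain ⟨x, _, rfl⟩ := ha
    simp)]
  simp

lemma foldl_min_desc : ∀ (t : List Int) (x : Int),
    List.Pairwise (fun a b => b ≤ a) (x :: t) →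
    t.foldl min x = (x :: t).getLast (List.cons_ne_nil x t) := by
  intro t
  induction t with
  | nil => intro x _; simp
  | cons y t' ih =>
    intro x h
    have hxy : y ≤ x := by
      rcases List.pairwise_cons.1 h with ⟨h1, _⟩
      exact h1 y (by simp)
    have h' : List.Pairwise (fun a b : Int => b ≤ a) (y :: t') :=
      (List.pairwise_cons.1 h).2
    simp only [List.foldl_cons, min_eq_right hxy]
    rw [ih y h', List.getLast_cons (List.cons_ne_nil y t')]

lemma min_desc (l : List Int) (hne : l ≠ [])
    (h : List.Pairwise (fun a b => b ≤ a) l) :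
    PySem.List.min? l (fun y => y) = some (l.getLast hne) := by
  cases l with
  | nil => exact absurd rfl hne
  | cons x t =>
    rw [PySem.List.min?_id_cons, foldl_min_desc t x h]

lemma lt_div_iff_mul (M j n : Nat) (hM : 1 ≤ M) : j < n / M ↔ M*j + M ≤ n := by
  rw [Nat.lt_iff_add_one_le, Nat.le_div_iff_mul_le (by omega), show (j+1)*M = M*j + M from by ring]

-- the descending sort is the reverse of the ascending sort (lists of values are equal)
lemma desc_eq_rev (score : List Int) :
    PySem.List.sorted score (fun x => x) true
      = (PySem.List.sorted score (fun x => x) false).reverse := by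
  refine List.Perm.eq_of_pairwise (le := fun a b : Int => b ≤ a)
    (fun a b _ _ h1 h2 => le_antisymm h2 h1)
    (PySem.List.sorted_pairwise_rev score (fun x => x)) ?_ ?_
  · rw [List.pairwise_reverse]
    exact PySem.List.sorted_pairwise score (fun x => x)
  · exact (PySem.List.sorted_perm score (fun x => x) true).trans
      ((PySem.List.sorted_perm score (fun x => x) false).symm.trans
        (List.reverse_perm _).symm)

-- A's chunk-and-min fold over a descending list equals the stride fold over the same list
lemma core (M : Nat) (s : List Int) (hM : 1 ≤ M) (hMn : M ≤ s.length)
    (hdesc : List.Pairwise (fun a b => b ≤ a) s) :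
    (((PySem.List.pyRange 0 (s.length : Int) (M : Int)).filter
        (fun i => ((PySem.List.slice s (some i) (some (i + (M : Int)))).length : Int) == (M : Int))).map
        (fun i => PySem.List.slice s (some i) (some (i + (M : Int))))).foldl
      (fun answer c => answer + (PySem.List.min? c (fun x => x)).getD 0 * (c.length : Int)) 0
    =
    (PySem.List.pyRange ((M : Int) - 1) (s.length : Int) (M : Int)).foldl
      (fun answer i => answer + PySem.List.pyGetD s i 0 * (M : Int)) 0 := by
  have hMpos : (0:Int) < (M:Int) := by exact_mod_cast hM
  set n := s.length with hn
  set q : Nat := n / M with hq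
  have hB : PySem.List.pyRange ((M : Int) - 1) (n : Int) (M : Int)
      = (List.range q).map (fun k : Nat => ((M:Int) - 1) + (M:Int) * (k:Int)) := by
    rw [PySem.List.pyRange_of_pos _ _ hMpos, if_pos (by omega)]
    have h1 : ((n:Int) - ((M:Int) - 1) + (M:Int) - 1) = ((n:Nat) : Int) := by ring
    rw [h1, show ((n:Int) / (M:Int)) = ((n / M : Nat) : Int) from (Int.natCast_div n M).symm,
       Int.toNat_natCast]
  have hA : PySem.List.pyRange 0 (n : Int) (M : Int)
      = (List.range ((n + M - 1)/M)).map (fun k : Nat => 0 + (M:Int) * (k:Int)) := by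
    rw [PySem.List.pyRange_of_pos _ _ hMpos, if_pos (by omega)]
    have h1 : ((n:Int) - 0 + (M:Int) - 1) = (((n + M - 1 : Nat)) : Int) := by omega
    rw [h1, show (((n + M - 1 : Nat)):Int) / (M:Int) = (((n + M - 1)/M : Nat) : Int) from (Int.natCast_div _ M).symm,
       Int.toNat_natCast]
  have hchunk : ∀ j : Nat, PySem.List.slice s (some (0 + (M:Int)*j)) (some (0 + (M:Int)*j + (M:Int)))
      = (s.drop (M*j)).take M := by
    intro j
    have h1 : (0 + (M:Int)*j) = ((M*j : Nat) : Int) := by push_cast; ring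
    rw [h1, PySem.List.slice_natCast_add]
  have hlen : ∀ j : Nat, j < q → ((s.drop (M*j)).take M).length = M := by
    intro j hj
    have h := (lt_div_iff_mul M j n hM).1 (hq ▸ hj)
    simp only [List.length_take, List.length_drop, ← hn]
    omega
  have hfilt : (List.range ((n + M - 1)/M)).filter
      (fun j : Nat => (((PySem.List.slice s (some (0 + (M:Int)*(j:Int))) (some (0 + (M:Int)*(j:Int) + (M:Int)))).length : Int) == (M:Int)))
      = List.range q := by
    rw [List.filter_congr (l := List.range ((n + M - 1)/M))
      (q := fun j => decide (j < q)) ?_]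
    · exact range_filter_lt q _ (Nat.div_le_div_right (by omega))
    · intro j _
      rw [hchunk j]
      have hlen' : ((s.drop (M*j)).take M).length = min M (n - M*j) := by
        simp [List.length_take, List.length_drop, ← hn]
      rw [hlen']
      rcases Nat.lt_or_ge j q with hlt | hge
      · have h := (lt_div_iff_mul M j n hM).1 (hq ▸ hlt)
        have hmm : min M (n - M*j) = M := by omega
        simp [hmm, hlt]
      · have h : ¬ (M*j + M ≤ n) := fun hc => absurd ((lt_div_iff_mul M j n hM).2 hc) (by omega)
        have hmin : min M (n - M*j) = n - M*j := by omega
        rw [hmin]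
        have hne : ((n - M*j : Nat) : Int) ≠ (M : Int) := by
          intro hc
          have : n - M*j = M := by exact_mod_cast hc
          omega
        simp [hne, Nat.not_lt.2 hge]
  rw [hA, hB, List.filter_map, List.map_map]
  simp only [Function.comp_def]
  rw [hfilt]
  rw [PySem.List.foldl_add, PySem.List.foldl_add, zero_add, zero_add, List.map_map, List.map_map]
  congr 1
  apply List.map_congr_left
  intro j hj
  rw [List.mem_range] at hj
  simp only [Function.comp_def]
  rw [hchunk j]
  have hjM : M*j + M ≤ n := (lt_div_iff_mul M j n hM).1 (hq ▸ hj)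
  have hlenj := hlen j hj
  have hne : (s.drop (M*j)).take M ≠ [] := by
    intro hc; rw [hc] at hlenj; simp at hlenj; omega
  have hpair : List.Pairwise (fun a b : Int => b ≤ a) ((s.drop (M*j)).take M) :=
    hdesc.sublist ((List.take_sublist _ _).trans (List.drop_sublist _ _))
  rw [min_desc _ hne hpair]
  have hgl : ((s.drop (M*j)).take M).getLast hne = s[M*j + (M-1)]'(by omega) := by
    simp only [List.getLast_eq_getElem, hlenj, List.getElem_take, List.getElem_drop]
  have hget : PySem.List.pyGetD s ((M:Int) - 1 + (M:Int)*j) 0 = s[M*j + (M-1)]'(by omega) := by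
    have hcast : ((M:Int) - 1 + (M:Int)*j) = ((M*j + (M-1) : Nat) : Int) := by push_cast; omega
    rw [hcast, PySem.List.pyGetD_eq_getElem s 0 (by positivity) (by exact_mod_cast (by omega : M*j + (M-1) < n))]
    have hidx : (((M * j + (M - 1) : Nat)) : Int).toNat = M*j + (M-1) := Int.toNat_natCast _
    simp only [hidx]
  rw [hget, hgl, hlenj, Option.getD_some]

-- the stride fold over the REVERSED ascending list equals M times B's backwards fold
lemma stride_desc_asc (M : Nat) (asc : List Int) (hM : 1 ≤ M) (hMn : M ≤ asc.length) :
    (PySem.List.pyRange ((M : Int) - 1) (asc.length : Int) (M : Int)).foldl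
      (fun answer i => answer + PySem.List.pyGetD asc.reverse i 0 * (M : Int)) 0
    =
    (M : Int) * (PySem.List.pyRange ((asc.length : Int) - (M : Int)) (-1) (-(M : Int))).foldl
      (fun acc i => acc + PySem.List.pyGetD asc i 0) 0 := by
  have hMpos : (0:Int) < (M:Int) := by exact_mod_cast hM
  set n := asc.length with hn
  set q : Nat := n / M with hq
  have hL : PySem.List.pyRange ((M : Int) - 1) (n : Int) (M : Int)
      = (List.range q).map (fun k : Nat => ((M:Int) - 1) + (M:Int) * (k:Int)) := by
    rw [PySem.List.pyRange_of_pos _ _ hMpos, if_pos (by omega)]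
    have h1 : ((n:Int) - ((M:Int) - 1) + (M:Int) - 1) = ((n:Nat) : Int) := by ring
    rw [h1, show ((n:Int) / (M:Int)) = ((n / M : Nat) : Int) from (Int.natCast_div n M).symm,
       Int.toNat_natCast]
  have hR : PySem.List.pyRange ((n : Int) - (M : Int)) (-1) (-(M : Int))
      = (List.range q).map (fun k : Nat => ((n:Int) - (M:Int)) + (-(M:Int)) * (k:Int)) := by
    unfold PySem.List.pyRange
    rw [if_neg (by omega)]
    simp only
    rw [if_neg (by omega), if_pos (by omega)]
    have h1 : ((n:Int) - (M:Int) - (-1) + -(-(M:Int)) - 1) = ((n:Nat) : Int) := by ring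
    rw [h1, show ((n:Int) / (-(-(M:Int)))) = ((n / M : Nat) : Int) from by
      rw [neg_neg]; exact (Int.natCast_div n M).symm, Int.toNat_natCast]
  rw [hL, hR, PySem.List.foldl_add, PySem.List.foldl_add, zero_add, zero_add,
     List.map_map, List.map_map]
  simp only [Function.comp_def]
  have hmap : ∀ j ∈ List.range q,
      PySem.List.pyGetD asc.reverse ((M:Int) - 1 + (M:Int)*(j:Int)) 0 * (M:Int)
      = PySem.List.pyGetD asc (((n:Int) - (M:Int)) + (-(M:Int))*(j:Int)) 0 * (M:Int) := by
    intro j hj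
    rw [List.mem_range] at hj
    have hjM : M*j + M ≤ n := (lt_div_iff_mul M j n hM).1 (hq ▸ hj)
    have hrevlen : asc.reverse.length = n := by simp [hn]
    have hc1 : ((M:Int) - 1 + (M:Int)*(j:Int)) = ((M*j + (M-1) : Nat) : Int) := by push_cast; omega
    have hc2 : (((n:Int) - (M:Int)) + (-(M:Int))*(j:Int)) = ((n - M - M*j : Nat) : Int) := by
      have h1 : (n - M - M*j : Nat) = n - (M + M*j) := by omega
      rw [h1, Nat.cast_sub (by omega : M + M*j ≤ n)]
      push_cast; ring
    rw [hc1, hc2,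
       PySem.List.pyGetD_eq_getElem asc.reverse 0 (by positivity)
         (by rw [hrevlen]; exact_mod_cast (by omega : M*j + (M-1) < n)),
       PySem.List.pyGetD_eq_getElem asc 0 (by positivity)
         (by rw [← hn]; exact_mod_cast (by omega : n - M - M*j < n))]
    simp only [Int.toNat_natCast]
    congr 1
    rw [List.getElem_reverse]
    congr 1
    simp only [← hn]
    omega
  rw [List.map_congr_left hmap]
  rw [show (fun j : Nat => PySem.List.pyGetD asc (((n:Int) - (M:Int)) + (-(M:Int))*(j:Int)) 0 * (M:Int))
      = (fun j : Nat => (M:Int) * PySem.List.pyGetD asc (((n:Int) - (M:Int)) + (-(M:Int))*(j:Int)) 0)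
      from funext fun j => mul_comm _ _]
  rw [← List.sum_map_mul_left]

theorem fruit_seller_eq_alt : ∀ (k : Int) (m : Int) (score : List Int),
    m ≠ 0 → fruit_seller k m score = fruit_seller_alt k m score := by
  intro k m score hm
  unfold fruit_seller fruit_seller_alt
  by_cases hgt : m > (score.length : Int)
  · rw [if_pos hgt, if_pos hgt]
  · rw [if_neg hgt, if_neg hgt]
    simp only [PySem.List.length_sorted]
    rcases lt_or_gt_of_ne hm with hneg | hpos
    · rw [pyRange_neg_nil 0 _ m hneg (by positivity),
          pyRange_pos_nil _ (-1) (-m) (by omega) (by omega)]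
      simp
    · obtain ⟨M, rfl⟩ : ∃ M : Nat, m = (M : Int) := ⟨m.toNat, (Int.toNat_of_nonneg hpos.le).symm⟩
      have hM : 1 ≤ M := by exact_mod_cast hpos
      have hMn : M ≤ score.length := by exact_mod_cast not_lt.1 hgt
      have hdesc : List.Pairwise (fun a b : Int => b ≤ a)
          (PySem.List.sorted score (fun x => x) false).reverse := by
        rw [List.pairwise_reverse]
        exact PySem.List.sorted_pairwise score (fun x => x)
      rw [desc_eq_rev score]
      have hlen : (PySem.List.sorted score (fun x => x) false).reverse.length = score.length := by
        simp [PySem.List.length_sorted]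
      have h := core M _ hM (by rw [hlen]; exact hMn) hdesc
      rw [hlen] at h
      rw [h]
      have h2 := stride_desc_asc M (PySem.List.sorted score (fun x => x) false) hM
        (by rw [PySem.List.length_sorted]; exact hMn)
      rw [PySem.List.length_sorted] at h2
      exact h2

-- ===== VERDICT (by name: the statement is the Claim_ definition above) =====
theorem fruit_seller_spec : Claim_equal_fruit_seller := by
  intro k m score _ hpre
  exact fruit_seller_eq_alt k m score hpre
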